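-- pv_equiv track=rewrite | github.com/heejongkim/aa_stat | AA_stat/locTools.py | RNHS_fast
-- ===== SOURCE A (Python) =====
-- from math import factorial
--
-- def RNHS_fast(spectrum_idict, theoretical_set, min_matched):
--     """
--     Matches experimental and theoretical spectra in int formats.
--
--     Parameters
--     ----------
--
--     spectrum_idict : list
--         Experimental spectrum in integer format.  Output of preprocess_spectrum.
--     theoretical_set: dict
--         A dict where key is ion type and value is a set of integers (m/z / fragment accuracy).
--         Output of get_theor_spec function.
--     min_matched : int
--         Minumum peaks to be matched.
--
--     Returns
--     -------
--
--     Number of matched peaks, score.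
--
--     """
--     isum = 0
--     matched_approx_b, matched_approx_y = 0, 0
--     for ion in theoretical_set['b']:
--         if ion in spectrum_idict:
--             matched_approx_b += 1
--             isum += spectrum_idict[ion]
--
--     for ion in theoretical_set['y']:
--         if ion in spectrum_idict:
--             matched_approx_y += 1
--             isum += spectrum_idict[ion]
--
--     matched_approx = matched_approx_b + matched_approx_y
--     if matched_approx >= min_matched:
--         return matched_approx, factorial(matched_approx_b) * factorial(matched_approx_y) * isum
--     else:
--         return 0, 0
-- ===== SOURCE B (Python) =====
-- from math import factorial
--
-- def RNHS_fast(spectrum_idict, theoretical_set, min_matched):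
--     b_set = theoretical_set['b']
--     y_set = theoretical_set['y']
--     matched_approx_b = 0
--     matched_approx_y = 0
--     isum = 0
--     for peak, intensity in spectrum_idict.items():
--         if peak in b_set:
--             matched_approx_b += 1
--             isum += intensity
--         if peak in y_set:
--             matched_approx_y += 1
--             isum += intensity
--     matched_approx = matched_approx_b + matched_approx_y
--     if matched_approx >= min_matched:
--         return matched_approx, factorial(matched_approx_b) * factorial(matched_approx_y) * isum
--     return 0, 0
-- ===== Notes on version B (the rewrite author's own statement) =====
-- stated objective: alternative
-- what changed: B makes a single pass over the experimental spectrum's items testing membership in the theoretical b/y sets, instead of A's two loops over the theoretical sets with a lookup into the spectrum dict for each ion.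
import Mathlib
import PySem

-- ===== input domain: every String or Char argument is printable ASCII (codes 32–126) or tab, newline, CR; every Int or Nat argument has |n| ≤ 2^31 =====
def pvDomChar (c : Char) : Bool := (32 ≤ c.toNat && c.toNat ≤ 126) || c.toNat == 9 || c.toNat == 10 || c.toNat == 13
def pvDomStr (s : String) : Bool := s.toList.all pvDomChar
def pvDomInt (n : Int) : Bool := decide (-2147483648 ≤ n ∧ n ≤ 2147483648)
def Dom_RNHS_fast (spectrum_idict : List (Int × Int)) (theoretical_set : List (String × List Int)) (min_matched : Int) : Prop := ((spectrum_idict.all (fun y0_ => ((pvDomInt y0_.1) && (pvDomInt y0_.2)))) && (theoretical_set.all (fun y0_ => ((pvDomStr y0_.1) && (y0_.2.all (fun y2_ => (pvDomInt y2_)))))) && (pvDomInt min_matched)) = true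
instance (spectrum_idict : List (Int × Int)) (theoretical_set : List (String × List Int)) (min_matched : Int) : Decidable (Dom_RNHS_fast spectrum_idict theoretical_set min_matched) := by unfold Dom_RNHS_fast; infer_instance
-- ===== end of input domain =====

-- B replaces A's two loops over the theoretical b/y ion sets (each probing the spectrum dict)
-- by one pass over the experimental spectrum's items testing membership in the two sets
-- (objective: alternative decomposition, same cost).

-- math.factorial on a nonnegative int
def pyFactorial (n : Int) : Int := (Nat.factorial n.toNat : Int)

-- ===== PORT A =====
def RNHS_fast (spectrum_idict : List (Int × Int)) (theoretical_set : List (String × List Int)) (min_matched : Int) : Int × Int :=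
  -- theoretical_set['b'] / ['y']: KeyError (excluded by Pre_) when absent
  match (PySem.Dict.mk theoretical_set).get? "b", (PySem.Dict.mk theoretical_set).get? "y" with
  | some bs, some ys =>
      let sd := PySem.Dict.mk spectrum_idict
      -- for ion in theoretical_set['b']: if ion in spectrum_idict: matched_approx_b += 1; isum += spectrum_idict[ion]
      let st1 := bs.foldl (fun (acc : Int × Int) ion =>
          if sd.contains ion then (acc.1 + 1, acc.2 + sd.getD ion 0) else acc) (0, 0)
      -- for ion in theoretical_set['y']: …  (isum continues from the first loop)
      let st2 := ys.foldl (fun (acc : Int × Int) ion =>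
          if sd.contains ion then (acc.1 + 1, acc.2 + sd.getD ion 0) else acc) (0, st1.2)
      let matched_approx := st1.1 + st2.1
      if matched_approx ≥ min_matched then
        (matched_approx, pyFactorial st1.1 * pyFactorial st2.1 * st2.2)
      else (0, 0)
  | _, _ => (0, 0)

-- ===== PORT B =====
-- math.factorial on a nonnegative int (B's own copy of the library call)
def pyFactorialB (n : Int) : Int := (n.toNat.factorial : Int)

def RNHS_fast_alt (spectrum_idict : List (Int × Int)) (theoretical_set : List (String × List Int)) (min_matched : Int) : Int × Int :=
  match (PySem.Dict.mk theoretical_set).get? "b" with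
  | none => (0, 0)
  | some bs =>
    match (PySem.Dict.mk theoretical_set).get? "y" with
    | none => (0, 0)
    | some ys =>
        -- for peak, intensity in spectrum_idict.items(): membership tests in the two sets
        let st := spectrum_idict.foldl (fun (acc : Int × Int × Int) kv =>
            let acc := if bs.contains kv.1 then (acc.1 + 1, acc.2.1, acc.2.2 + kv.2) else acc
            if ys.contains kv.1 then (acc.1, acc.2.1 + 1, acc.2.2 + kv.2) else acc) (0, 0, 0)
        let matched_approx := st.1 + st.2.1
        if matched_approx ≥ min_matched then
          (matched_approx, pyFactorialB st.1 * pyFactorialB st.2.1 * st.2.2)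
        else (0, 0)

-- ===== PRECONDITION & SPEC =====
-- Pre_ excludes inputs where A raises KeyError (no 'b' or 'y' key) and association lists that do
-- not encode a Python dict/set (duplicate spectrum keys or duplicate set elements) — genuine
-- Python dicts/sets always satisfy the Nodup conditions under the type convention.
def Pre_RNHS_fast (spectrum_idict : List (Int × Int)) (theoretical_set : List (String × List Int)) (min_matched : Int) : Prop :=
  ((PySem.Dict.mk theoretical_set).get? "b").isSome = true ∧
  ((PySem.Dict.mk theoretical_set).get? "y").isSome = true ∧
  (spectrum_idict.map Prod.fst).Nodup ∧
  (((PySem.Dict.mk theoretical_set).get? "b").getD []).Nodup ∧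
  (((PySem.Dict.mk theoretical_set).get? "y").getD []).Nodup

instance (spectrum_idict : List (Int × Int)) (theoretical_set : List (String × List Int)) (min_matched : Int) : Decidable (Pre_RNHS_fast spectrum_idict theoretical_set min_matched) := by unfold Pre_RNHS_fast; infer_instance

def pvWitness_RNHS_fast : (List (Int × Int)) × (List (String × List Int)) × Int := ([(1, 10), (2, 5)], [("b", [1, 3]), ("y", [2])], 1)

def Spec_RNHS_fast (spectrum_idict : List (Int × Int)) (theoretical_set : List (String × List Int)) (min_matched : Int) (out : Int × Int) : Prop := out = RNHS_fast_alt spectrum_idict theoretical_set min_matched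
instance (spectrum_idict : List (Int × Int)) (theoretical_set : List (String × List Int)) (min_matched : Int) (out : Int × Int) : Decidable (Spec_RNHS_fast spectrum_idict theoretical_set min_matched out) := by unfold Spec_RNHS_fast; infer_instance

-- ===== CLAIM (what is proved, stated in full; the proofs are below) =====
def Claim_equal_RNHS_fast : Prop := ∀ (spectrum_idict : List (Int × Int)) (theoretical_set : List (String × List Int)) (min_matched : Int), Dom_RNHS_fast spectrum_idict theoretical_set min_matched → Pre_RNHS_fast spectrum_idict theoretical_set min_matched → Spec_RNHS_fast spectrum_idict theoretical_set min_matched (RNHS_fast spectrum_idict theoretical_set min_matched)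

-- ===== LEMMAS AND PROOFS =====

-- characterisation of A's loop over one theoretical set
theorem foldA_char (s : List (Int × Int)) (bs : List Int) : ∀ (mb isum : Int),
    bs.foldl (fun (acc : Int × Int) ion =>
        if (PySem.Dict.mk s).contains ion then (acc.1 + 1, acc.2 + (PySem.Dict.mk s).getD ion 0) else acc) (mb, isum)
    = (mb + ((bs.filter (fun i => (PySem.Dict.mk s).contains i)).length : Int),
       isum + ((bs.filter (fun i => (PySem.Dict.mk s).contains i)).map (fun i => (PySem.Dict.mk s).getD i 0)).sum) := by
  induction bs with
  | nil => intro mb isum; simp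
  | cons a t ih =>
    intro mb isum
    simp only [List.foldl_cons, List.filter_cons]
    by_cases h : (PySem.Dict.mk s).contains a = true
    · rw [if_pos h, if_pos h, ih]
      simp only [Prod.mk.injEq, List.length_cons, List.map_cons, List.sum_cons]
      constructor <;> push_cast <;> ring
    · rw [if_neg h, if_neg h, ih]

-- characterisation of B's single pass over the spectrum
theorem foldB_char (bs ys : List Int) (s : List (Int × Int)) : ∀ (mb my isum : Int),
    s.foldl (fun (acc : Int × Int × Int) kv =>
        let acc := if bs.contains kv.1 then (acc.1 + 1, acc.2.1, acc.2.2 + kv.2) else acc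
        if ys.contains kv.1 then (acc.1, acc.2.1 + 1, acc.2.2 + kv.2) else acc) (mb, my, isum)
    = (mb + ((s.filter (fun kv => bs.contains kv.1)).length : Int),
       my + ((s.filter (fun kv => ys.contains kv.1)).length : Int),
       isum + (s.map (fun kv => (if bs.contains kv.1 then kv.2 else 0) + (if ys.contains kv.1 then kv.2 else 0))).sum) := by
  induction s with
  | nil => intro mb my isum; simp
  | cons a t ih =>
    intro mb my isum
    simp only [List.foldl_cons, List.filter_cons, List.map_cons, List.sum_cons]
    by_cases hb : bs.contains a.1 = true <;> by_cases hy : ys.contains a.1 = true <;>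
      simp only [hb, hy, if_pos, if_false, Bool.false_eq_true] <;>
      rw [ih] <;>
      simp only [Prod.mk.injEq, List.length_cons] <;>
      (and_intros <;> first | trivial | (push_cast; ring))

-- key permutation: the matched (ion, intensity) pairs seen from the theoretical side
-- are a permutation of the matched spectrum items
theorem matched_perm (s : List (Int × Int)) (bs : List Int)
    (hs : (s.map Prod.fst).Nodup) (hbs : bs.Nodup) :
    ((bs.filter (fun i => (PySem.Dict.mk s).contains i)).map (fun i => (i, (PySem.Dict.mk s).getD i 0))).Perm
      (s.filter (fun kv => bs.contains kv.1)) := by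
  have hkeys : (PySem.Dict.mk s).keys.Nodup := by simpa [PySem.Dict.keys] using hs
  have hsnd : s.Nodup := hs.of_map Prod.fst
  have hmem : ∀ k v, ((k, v) ∈ s) ↔ (PySem.Dict.mk s).get? k = some v := by
    intro k v
    constructor
    · intro h; exact PySem.Dict.get?_of_mem_items (d := PySem.Dict.mk s) h hkeys
    · intro h; exact PySem.Dict.mem_items_of_get?_eq_some (d := PySem.Dict.mk s) h
  apply (List.perm_ext_iff_of_nodup ?_ ?_).2
  · intro x
    obtain ⟨k, v⟩ := x
    simp only [List.mem_map, List.mem_filter]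
    constructor
    · rintro ⟨i, ⟨hi, hc⟩, heq⟩
      obtain ⟨hk, hv⟩ := Prod.mk.injEq .. ▸ heq
      subst hk
      have : ∃ w, (PySem.Dict.mk s).get? i = some w := by
        rw [PySem.Dict.contains_eq_isSome_get?] at hc
        exact Option.isSome_iff_exists.1 hc
      obtain ⟨w, hw⟩ := this
      have hgd : (PySem.Dict.mk s).getD i 0 = w := PySem.Dict.getD_of_get?_eq_some _ 0 hw
      refine ⟨?_, ?_⟩
      · rw [← hv, hgd]; exact (hmem i w).2 hw
      · simpa using hi
    · rintro ⟨hmem_s, hk⟩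
      refine ⟨k, ⟨by simpa using hk, ?_⟩, ?_⟩
      · rw [PySem.Dict.contains_eq_isSome_get?, (hmem k v).1 hmem_s]; rfl
      · have : (PySem.Dict.mk s).getD k 0 = v := PySem.Dict.getD_of_get?_eq_some _ 0 ((hmem k v).1 hmem_s)
        rw [this]
  · exact (hbs.filter _).map (fun a b h => (Prod.mk.injEq .. ▸ h).1)
  · exact hsnd.filter _

theorem sum_ite_filter (l : List (Int × Int)) (p : Int × Int → Bool) :
    (l.map (fun kv => if p kv then kv.2 else 0)).sum = ((l.filter p).map Prod.snd).sum := by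
  induction l with
  | nil => simp
  | cons a t ih => by_cases h : p a = true <;> simp [h, ih]

theorem sum_map_add' (l : List (Int × Int)) (f g : Int × Int → Int) :
    (l.map (fun x => f x + g x)).sum = (l.map f).sum + (l.map g).sum := by
  induction l with
  | nil => simp
  | cons a t ih => simp [ih]; ring

-- count and intensity-sum transfer from A's traversal to B's
theorem matched_length (s : List (Int × Int)) (bs : List Int)
    (hs : (s.map Prod.fst).Nodup) (hbs : bs.Nodup) :
    (bs.filter (fun i => (PySem.Dict.mk s).contains i)).length
      = (s.filter (fun kv => bs.contains kv.1)).length := by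
  have h := (matched_perm s bs hs hbs).length_eq
  simpa using h

theorem matched_sum (s : List (Int × Int)) (bs : List Int)
    (hs : (s.map Prod.fst).Nodup) (hbs : bs.Nodup) :
    ((bs.filter (fun i => (PySem.Dict.mk s).contains i)).map (fun i => (PySem.Dict.mk s).getD i 0)).sum
      = (s.map (fun kv => if bs.contains kv.1 then kv.2 else 0)).sum := by
  have h := ((matched_perm s bs hs hbs).map Prod.snd).sum_eq
  rw [sum_ite_filter]
  simpa [List.map_map, Function.comp] using h

-- ===== VERDICT (by name: the statement is the Claim_ definition above) =====
theorem RNHS_fast_spec : Claim_equal_RNHS_fast := by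
  intro s t m _ hpre
  obtain ⟨hb, hy, hs, hbn, hyn⟩ := hpre
  obtain ⟨bs, hbs⟩ := Option.isSome_iff_exists.1 hb
  obtain ⟨ys, hys⟩ := Option.isSome_iff_exists.1 hy
  rw [hbs] at hbn; rw [hys] at hyn
  simp only [Option.getD_some] at hbn hyn
  unfold Spec_RNHS_fast RNHS_fast RNHS_fast_alt
  rw [hbs, hys]
  simp only [foldA_char, foldB_char]
  have hfac : ∀ n : Int, pyFactorial n = pyFactorialB n := fun n => rfl
  rw [matched_length s bs hs hbn, matched_length s ys hs hyn,
      matched_sum s bs hs hbn, matched_sum s ys hs hyn,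
      sum_map_add']
  simp only [hfac]
  norm_num
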